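-- pv_equiv track=rewrite | github.com/vaishu567/dsapracrepo | Python/recursion/recursion.py | goodNumbers
-- ===== SOURCE A (Python) =====
-- def goods(sumn,temp,digit):
--     if temp==0:
--         return True
--     rem=temp%10
--     if rem>sumn and rem!=digit:
--         sumn+=rem
--         temp=temp//10
--         return goods(sumn,temp,digit)
--     return False
--
-- def goodNumbers(a, b, digit):
--     op=[]
--     for num in range(a,b+1):
--         temp=num
--         sumn=temp%10
--         if sumn==digit:
--             continue
--         temp=temp//10
--         if goods(sumn,temp,digit)==True:
--             op.append(num)
--     return op
-- ===== SOURCE B (Python) =====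
-- def _digits(n):
--     # right-to-left decimal digits of n (for n >= 0)
--     return [n] if n < 10 else [n % 10] + _digits(n // 10)
--
-- def _presums(s, ds):
--     # [s, s+ds[0], s+ds[0]+ds[1], ...]
--     if not ds:
--         return [s]
--     return [s] + _presums(s + ds[0], ds[1:])
--
-- def goodNumbers(a, b, digit):
--     out = []
--     for n in range(a, b + 1):
--         if n < 0:
--             continue
--         ds = _digits(n)
--         if digit in ds:
--             continue
--         pre = _presums(0, ds)
--         if all(d > s for d, s in zip(ds[1:], pre[1:])):
--             out.append(n)
--     return out
-- ===== Notes on version B (the rewrite author's own statement) =====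
-- stated objective: alternative
-- what changed: Replaces the sum-threading boolean recursion by a staged pipeline: build the digit list, test digit-membership on the whole list, then compare each digit against a precomputed prefix-sum table via zip/all (negative numbers are rejected directly, which provably matches A).
import Mathlib
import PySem

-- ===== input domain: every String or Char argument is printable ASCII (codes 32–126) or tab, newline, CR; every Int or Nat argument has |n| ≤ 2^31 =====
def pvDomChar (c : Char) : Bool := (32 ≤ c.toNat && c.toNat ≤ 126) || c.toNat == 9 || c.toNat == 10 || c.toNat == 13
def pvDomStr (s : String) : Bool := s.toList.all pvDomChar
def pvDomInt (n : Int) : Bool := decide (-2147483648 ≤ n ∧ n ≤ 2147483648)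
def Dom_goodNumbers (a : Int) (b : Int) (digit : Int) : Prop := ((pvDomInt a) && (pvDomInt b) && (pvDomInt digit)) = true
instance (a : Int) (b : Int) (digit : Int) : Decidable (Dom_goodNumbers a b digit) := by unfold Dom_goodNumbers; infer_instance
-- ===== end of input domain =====

-- B replaces A's sum-threading boolean recursion by a staged pipeline: digit list,
-- digit-membership test, prefix-sum table, zip/all comparison (objective: alternative).

-- termination fact for the digit loops (cited by both ports)
theorem pv_fd10_facts (t : Int) :
    PySem.Int.floordiv t 10 * 10 + PySem.Int.mod t 10 = t ∧
    0 ≤ PySem.Int.mod t 10 ∧ PySem.Int.mod t 10 < 10 := by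
  exact ⟨PySem.Int.floordiv_mul_add_mod t 10,
    PySem.Int.mod_nonneg t (by norm_num), PySem.Int.mod_lt t (by norm_num)⟩

-- ===== PORT A =====
def goods (sumn : Int) (temp : Int) (digit : Int) : Bool :=
  if _h0 : temp = 0 then true
  else
    if _h : PySem.Int.mod temp 10 > sumn ∧ PySem.Int.mod temp 10 ≠ digit then
      goods (sumn + PySem.Int.mod temp 10) (PySem.Int.floordiv temp 10) digit
    else false
termination_by (temp.natAbs, (10 - sumn).toNat)
decreasing_by
  rcases eq_or_ne temp (-1) with h1 | h1
  · subst h1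
    have hm : PySem.Int.mod (-1) 10 = 9 := by decide
    right
    rw [hm] at _h ⊢; omega
  · have h := pv_fd10_facts temp
    exact Prod.Lex.left _ _ (by omega)

def goodNumbers (a : Int) (b : Int) (digit : Int) : List Int :=
  (PySem.List.pyRange a (b + 1) 1).foldl
    (fun op num =>
      let sumn := PySem.Int.mod num 10
      if sumn = digit then op
      else if goods sumn (PySem.Int.floordiv num 10) digit = true then op ++ [num] else op)
    []

-- ===== PORT B =====
-- right-to-left decimal digits of n (for n >= 0)
def pvDigits (n : Int) : List Int :=
  if n < 10 then [n]
  else PySem.Int.mod n 10 :: pvDigits (PySem.Int.floordiv n 10)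
termination_by n.toNat
decreasing_by
  have h := pv_fd10_facts n
  omega

-- [s, s+ds[0], s+ds[0]+ds[1], ...]
def pvPresums (s : Int) (ds : List Int) : List Int :=
  match ds with
  | [] => [s]
  | d :: rest => s :: pvPresums (s + d) rest

def goodNumbers_alt (a : Int) (b : Int) (digit : Int) : List Int :=
  (PySem.List.pyRange a (b + 1) 1).foldl
    (fun out n =>
      if n < 0 then out
      else
        let ds := pvDigits n
        if digit ∈ ds then out
        else
          let pre := pvPresums 0 ds
          if ((ds.drop 1).zip (pre.drop 1)).all (fun p => p.2 < p.1) then out ++ [n]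
          else out)
    []

-- ===== PRECONDITION & SPEC =====
def Spec_goodNumbers (a : Int) (b : Int) (digit : Int) (out : List Int) : Prop := out = goodNumbers_alt a b digit
instance (a : Int) (b : Int) (digit : Int) (out : List Int) : Decidable (Spec_goodNumbers a b digit out) := by unfold Spec_goodNumbers; infer_instance

-- ===== CLAIM (what is proved, stated in full; the proofs are below) =====
def Claim_equal_goodNumbers : Prop := ∀ (a : Int) (b : Int) (digit : Int), Dom_goodNumbers a b digit → Spec_goodNumbers a b digit (goodNumbers a b digit)

-- ===== LEMMAS AND PROOFS =====

-- A's helper never reaches its base case on a negative argument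
theorem goods_neg (sumn temp digit : Int) (ht : temp < 0) : goods sumn temp digit = false := by
  induction sumn, temp using goods.induct digit with
  | case1 s => omega
  | case2 s t h0 h ih =>
    rw [goods, dif_neg h0, dif_pos h]
    have hf := pv_fd10_facts t
    exact ih (by omega)
  | case3 s t h0 h =>
    rw [goods, dif_neg h0, dif_neg h]

-- characterisation of A's recursion (t ≥ 1) in B's staged terms
theorem goods_char (t : Int) : ∀ (s d : Int), 1 ≤ t →
    goods s t d = (((pvDigits t).all fun r => decide (r ≠ d)) &&
      (((pvDigits t).zip (pvPresums s (pvDigits t))).all fun p => decide (p.2 < p.1))) := by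
  induction t using pvDigits.induct with
  | case1 t hlt =>
    intro s d ht
    have hf := pv_fd10_facts t
    have hm : PySem.Int.mod t 10 = t := by omega
    have hd : PySem.Int.floordiv t 10 = 0 := by omega
    rw [goods, dif_neg (by omega : ¬ t = 0), hm, hd]
    rw [pvDigits, if_pos hlt]
    by_cases h : t > s ∧ t ≠ d
    · rw [dif_pos h, goods]
      simp [pvPresums, h.1, h.2]
    · rw [dif_neg h]
      simp only [pvPresums, List.all_cons, List.all_nil, List.zip_cons_cons]
      push_neg at h
      by_cases h1 : t = d
      · simp [h1]
      · have hs : ¬ s < t := by omega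
        simp [h1, hs]
  | case2 t hlt ih =>
    intro s d ht
    have hf := pv_fd10_facts t
    have ht' : 1 ≤ PySem.Int.floordiv t 10 := by omega
    rw [goods, dif_neg (by omega : ¬ t = 0)]
    rw [pvDigits, if_neg hlt]
    by_cases h : PySem.Int.mod t 10 > s ∧ PySem.Int.mod t 10 ≠ d
    · rw [dif_pos h, ih (s + PySem.Int.mod t 10) d ht']
      have e1 : decide (PySem.Int.mod t 10 ≠ d) = true := decide_eq_true h.2
      have e2 : decide (s < PySem.Int.mod t 10) = true := decide_eq_true h.1
      simp only [pvPresums, List.all_cons, List.zip_cons_cons, e1, e2, Bool.true_and]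
    · rw [dif_neg h]
      by_cases h1 : PySem.Int.mod t 10 = d
      · have e1 : decide (PySem.Int.mod t 10 ≠ d) = false := decide_eq_false (not_not_intro h1)
        simp only [pvPresums, List.all_cons, List.zip_cons_cons, e1, Bool.false_and]
      · have hs : ¬ s < PySem.Int.mod t 10 := fun hc => h1 (by
          by_contra hne
          exact h ⟨hc, hne⟩)
        have e2 : decide (s < PySem.Int.mod t 10) = false := decide_eq_false hs
        simp only [pvPresums, List.all_cons, List.zip_cons_cons, e2, Bool.false_and,
          Bool.and_false]

-- per-element step functions of the two folds coincide
theorem step_eq (d : Int) :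
    (fun (op : List Int) (num : Int) =>
      let sumn := PySem.Int.mod num 10
      if sumn = d then op
      else if goods sumn (PySem.Int.floordiv num 10) d = true then op ++ [num] else op)
    = (fun (out : List Int) (n : Int) =>
      if n < 0 then out
      else
        let ds := pvDigits n
        if d ∈ ds then out
        else
          let pre := pvPresums 0 ds
          if ((ds.drop 1).zip (pre.drop 1)).all (fun p => p.2 < p.1) then out ++ [n]
          else out) := by
  funext op num
  simp only []
  have hf := pv_fd10_facts num
  by_cases hneg : num < 0
  · rw [if_pos hneg]
    by_cases hm : PySem.Int.mod num 10 = d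
    · rw [if_pos hm]
    · have hfd : PySem.Int.floordiv num 10 < 0 := by omega
      rw [if_neg hm, goods_neg _ _ d hfd]
      simp
  · rw [if_neg hneg]
    by_cases hlt : num < 10
    · -- single digit: 0 ≤ num ≤ 9
      have hm : PySem.Int.mod num 10 = num := by omega
      have hd : PySem.Int.floordiv num 10 = 0 := by omega
      rw [hm, hd, pvDigits, if_pos hlt]
      by_cases h1 : num = d
      · rw [if_pos h1, if_pos (List.mem_cons.mpr (Or.inl h1.symm))]
      · rw [if_neg h1,
          if_neg (show d ∉ [num] from fun hc => h1 (List.mem_singleton.mp hc).symm), goods]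
        simp [pvPresums]
    · -- num ≥ 10
      have ht' : 1 ≤ PySem.Int.floordiv num 10 := by omega
      rw [pvDigits, if_neg hlt]
      by_cases h1 : PySem.Int.mod num 10 = d
      · rw [if_pos h1, if_pos (List.mem_cons.mpr (Or.inl h1.symm))]
      · rw [if_neg h1, goods_char _ _ d ht']
        by_cases hmem : d ∈ pvDigits (PySem.Int.floordiv num 10)
        · have hallf : (pvDigits (PySem.Int.floordiv num 10)).all (fun r => decide (r ≠ d)) = false := by
            simp only [List.all_eq_false]
            exact ⟨d, hmem, by simp⟩
          rw [hallf, Bool.false_and, if_neg (by simp : ¬ (false = true)),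
            if_pos (List.mem_cons_of_mem _ hmem)]
        · have hnm : d ∉ PySem.Int.mod num 10 :: pvDigits (PySem.Int.floordiv num 10) := by
            intro hc
            rcases List.mem_cons.mp hc with hc | hc
            · exact h1 hc.symm
            · exact hmem hc
          have hall : (pvDigits (PySem.Int.floordiv num 10)).all (fun r => decide (r ≠ d)) = true := by
            simp only [List.all_eq_true]
            intro r hr
            simp only [decide_eq_true_eq]
            exact fun he => hmem (he ▸ hr)
          rw [hall, Bool.true_and, if_neg hnm]
          simp only [pvPresums, List.drop_succ_cons, List.drop_zero, zero_add]

theorem goodNumbers_eq (a b d : Int) : goodNumbers a b d = goodNumbers_alt a b d := by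
  unfold goodNumbers goodNumbers_alt
  rw [step_eq d]

-- ===== VERDICT (by name: the statement is the Claim_ definition above) =====
theorem goodNumbers_spec : Claim_equal_goodNumbers := by
  intro a b d _
  exact goodNumbers_eq a b d
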